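-- pv_equiv track=rewrite | github.com/tuckerdickson/Software-Design | Computer Science Fundamentals/HW2/HW2.py | q3
-- ===== SOURCE A (Python) =====
-- def q3(inputString, minLetter, lettersToIgnore, specialLetter):
--
--     smallestChar = None
--     highestIndex = 0
--     specialLetterCount = 0
--
--     # iterate through every index in the inputString
--     currentIndex = 0
--     while currentIndex < len(inputString):
--         # reinitialize currentChar to the character at the current index
--         currentChar = inputString[currentIndex]
--
--         # check if the current character is greater than minLetter
--         if currentChar > minLetter:
--
--             # check if the smallest character so far equals none
--             # or if the current character is less than or equal to the smallest character so far
--             if (smallestChar == None) or (currentChar <= smallestChar):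
--
--                 # check to see if the current character isn't in lettersToIgnore
--                 if (currentChar not in lettersToIgnore):
--
--                     # if all 3 of the above conditions are met, set the smallest character to far to the current character
--                     # and set the highest index to the current index
--                     smallestChar = currentChar
--                     highestIndex = currentIndex
--
--         # if the current character equals the specialLetter, increment the special letter count
--         if currentChar == specialLetter:
--             specialLetterCount = specialLetterCount + 1
--
--         currentIndex = currentIndex + 1
--
--     # if highestIndex still equals 0 at this point, no smallestChar was found
--     # reinitialize highestIndex to None
--     if highestIndex == 0:
--         highestIndex = None
--
--     # if specialLetter occurs and even number of times return False, otherwise it's odd so return true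
--     if (specialLetterCount % 2 == 0):
--         odd = False
--     else:
--         odd = True
--
--     return smallestChar, highestIndex, odd
-- ===== SOURCE B (Python) =====
-- def q3(inputString, minLetter, lettersToIgnore, specialLetter):
--     odd = sum(1 for c in inputString if c == specialLetter) % 2 == 1
--
--     cand = [(c, i) for i, c in enumerate(inputString)
--             if c > minLetter and c not in lettersToIgnore]
--     if not cand:
--         return None, None, odd
--
--     smallestChar = min(c for c, _ in cand)
--     highestIndex = max(i for c, i in cand if c == smallestChar)
--     return smallestChar, highestIndex, odd
-- ===== Notes on version B (the rewrite author's own statement) =====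
-- stated objective: simpler
-- what changed: A's single stateful while-loop (running minimum, running last index, running counter) is replaced by a direct decomposition: filter the qualifying (char, index) pairs once with a comprehension, then take min of the chars, max index of the minimal char, and a count-based parity.
-- intended difference: On inputs where the first character qualifies and every later qualifying character is strictly greater (so the winning match sits only at index 0), A's 0-sentinel makes it return None for the index as if nothing matched, while B returns the genuine index 0, which is the intended value. — e.g. on q3("b", "a", "", ""): A returns (some "b", none, false), B returns (some "b", some 0, false)
import Mathlib
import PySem

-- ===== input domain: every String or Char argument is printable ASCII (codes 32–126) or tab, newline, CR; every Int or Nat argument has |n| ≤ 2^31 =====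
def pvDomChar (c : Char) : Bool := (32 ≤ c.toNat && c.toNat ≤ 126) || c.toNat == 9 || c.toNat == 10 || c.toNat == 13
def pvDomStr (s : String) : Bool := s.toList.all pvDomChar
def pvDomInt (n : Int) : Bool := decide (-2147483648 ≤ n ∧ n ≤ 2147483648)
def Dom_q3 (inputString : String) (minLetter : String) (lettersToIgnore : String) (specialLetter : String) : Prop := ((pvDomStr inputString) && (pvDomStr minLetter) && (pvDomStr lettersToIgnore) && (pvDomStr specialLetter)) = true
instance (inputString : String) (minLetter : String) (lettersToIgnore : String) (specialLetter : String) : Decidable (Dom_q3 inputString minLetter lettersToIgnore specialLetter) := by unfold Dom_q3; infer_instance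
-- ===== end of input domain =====

-- B replaces A's single stateful while-loop by a direct decomposition (filter the qualifying
-- (char, index) pairs once, then take min / max / count); objective: simpler, not faster.
-- On inputs where the winning match sits only at index 0 (D_q3) A's 0-sentinel returns None for
-- the index while B returns the genuine 0; B's value is the intended one.

-- ===== PORT A =====
-- One iteration of A's while-loop body, on state (smallestChar, highestIndex, specialLetterCount).
-- smallestChar is a 1-char Python string, held as Option Char; single-char string comparison
-- c <= s is char comparison on code points, written literally as [c] ≤ [s] (list lexicographic =
-- Python string order, exact); 'currentChar not in lettersToIgnore' is PySem.Chars.isIn of the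
-- 1-char string (exact).
def q3Step (minL ign spec : List Char) (i : Int) (c : Char) :
    Option Char × Int × Int → Option Char × Int × Int
  | (sc, hi, cnt) =>
    let schi : Option Char × Int :=
      if minL < [c] then
        if (match sc with | none => true | some s => decide ([c] ≤ [s])) = true then
          if PySem.Chars.isIn [c] ign = false then (some c, i) else (sc, hi)
        else (sc, hi)
      else (sc, hi)
    (schi.1, schi.2, if [c] = spec then cnt + 1 else cnt)

-- A's while-loop: walk the characters left to right carrying the current index and the state.
def q3Go (minL ign spec : List Char) : List Char → Int → Option Char × Int × Int → Option Char × Int × Int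
  | [], _, st => st
  | c :: rest, i, st => q3Go minL ign spec rest (i + 1) (q3Step minL ign spec i c st)

def q3 (inputString : String) (minLetter : String) (lettersToIgnore : String) (specialLetter : String) : Option String × Option Int × Bool :=
  match q3Go minLetter.toList lettersToIgnore.toList specialLetter.toList inputString.toList 0 (none, 0, 0) with
  | (sc, hi, cnt) =>
    (sc.map (fun c => String.ofList [c]),
     if hi = 0 then none else some hi,
     if PySem.Int.mod cnt 2 = 0 then false else true)

-- ===== PORT B =====
-- Source B's qualification test: c > minLetter and c not in lettersToIgnore.
def q3QualB (minL ign : List Char) (c : Char) : Bool :=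
  decide (minL < [c]) && !PySem.Chars.isIn [c] ign

-- The comprehension of Source B: qualifying (char, index) pairs, via enumerate + filter + map.
def q3Cand (minL ign : List Char) (cs : List Char) : List (Char × Int) :=
  ((PySem.List.enumerate cs).filter (fun p => q3QualB minL ign p.2)).map (fun p => (p.2, p.1))

def q3_alt (inputString : String) (minLetter : String) (lettersToIgnore : String) (specialLetter : String) : Option String × Option Int × Bool :=
  let cs := inputString.toList
  let spec := specialLetter.toList
  -- sum(1 for c in inputString if c == specialLetter) is List.countP of the predicate
  let odd := decide (cs.countP (fun c => decide ([c] = spec)) % 2 = 1)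
  let cand := q3Cand minLetter.toList lettersToIgnore.toList cs
  match (cand.map Prod.fst).min? with
  | none => (none, none, odd)
  | some m =>
    -- max over a provably nonempty generator: .getD 0 is never taken
    (some (String.ofList [m]),
     some (((((cand.filter (fun p => decide (p.1 = m))).map Prod.snd).max?).getD 0)),
     odd)

-- ===== PRECONDITION & SPEC =====
-- On inputs where the first character qualifies and every later qualifying character is strictly
-- greater (the winning match sits only at index 0), A returns None for the index because of its
-- 0-sentinel, while B returns the genuine index 0, which is the intended value.
def D_q3 (inputString : String) (minLetter : String) (lettersToIgnore : String) (specialLetter : String) : Prop :=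
  (match inputString.toList with
   | [] => false
   | c :: rest =>
       (decide (minLetter.toList < [c]) && !PySem.Chars.isIn [c] lettersToIgnore.toList) &&
         rest.all (fun d =>
           !(decide (minLetter.toList < [d]) && !PySem.Chars.isIn [d] lettersToIgnore.toList) ||
             decide (c < d))) = true
instance (inputString : String) (minLetter : String) (lettersToIgnore : String) (specialLetter : String) : Decidable (D_q3 inputString minLetter lettersToIgnore specialLetter) := by unfold D_q3; infer_instance

def Spec_q3 (inputString : String) (minLetter : String) (lettersToIgnore : String) (specialLetter : String) (out : Option String × Option Int × Bool) : Prop := ¬ D_q3 inputString minLetter lettersToIgnore specialLetter → out = q3_alt inputString minLetter lettersToIgnore specialLetter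
instance (inputString : String) (minLetter : String) (lettersToIgnore : String) (specialLetter : String) (out : Option String × Option Int × Bool) : Decidable (Spec_q3 inputString minLetter lettersToIgnore specialLetter out) := by unfold Spec_q3; infer_instance

def pvDiffWitness_q3 : String × String × String × String := ("b", "a", "", "")
def pvDiffWitnessOut_q3 : (Option String × Option Int × Bool) × (Option String × Option Int × Bool) :=
  ((some "b", none, false), (some "b", some 0, false))

-- ===== CLAIM =====
def Claim_unchanged_q3 : Prop := ∀ (inputString : String) (minLetter : String) (lettersToIgnore : String) (specialLetter : String), Dom_q3 inputString minLetter lettersToIgnore specialLetter → Spec_q3 inputString minLetter lettersToIgnore specialLetter (q3 inputString minLetter lettersToIgnore specialLetter)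
def Claim_changed_q3 : Prop := Dom_q3 (pvDiffWitness_q3.1) (pvDiffWitness_q3.2.1) (pvDiffWitness_q3.2.2.1) (pvDiffWitness_q3.2.2.2) ∧ D_q3 (pvDiffWitness_q3.1) (pvDiffWitness_q3.2.1) (pvDiffWitness_q3.2.2.1) (pvDiffWitness_q3.2.2.2) ∧ q3 (pvDiffWitness_q3.1) (pvDiffWitness_q3.2.1) (pvDiffWitness_q3.2.2.1) (pvDiffWitness_q3.2.2.2) = pvDiffWitnessOut_q3.1 ∧ q3_alt (pvDiffWitness_q3.1) (pvDiffWitness_q3.2.1) (pvDiffWitness_q3.2.2.1) (pvDiffWitness_q3.2.2.2) = pvDiffWitnessOut_q3.2 ∧ pvDiffWitnessOut_q3.1 ≠ pvDiffWitnessOut_q3.2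
def Claim_exact_q3 : Prop := ∀ (inputString : String) (minLetter : String) (lettersToIgnore : String) (specialLetter : String), Dom_q3 inputString minLetter lettersToIgnore specialLetter → D_q3 inputString minLetter lettersToIgnore specialLetter → q3 inputString minLetter lettersToIgnore specialLetter ≠ q3_alt inputString minLetter lettersToIgnore specialLetter

-- ===== LEMMAS AND PROOFS =====

theorem singleton_lt_iff (a b : Char) : ([a] < [b]) ↔ a < b := by
  constructor
  · intro h
    cases h with
    | rel h => exact h
    | cons h => cases h
  · intro h; exact List.Lex.rel h

theorem singleton_le_iff (a b : Char) : ([a] ≤ [b]) ↔ a ≤ b := by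
  simp [singleton_lt_iff, le_iff_lt_or_eq]

-- what B computes before its final packaging, as a single state
def bState (minL ign spec : List Char) (cs : List Char) : Option Char × Int × Int :=
  (((q3Cand minL ign cs).map Prod.fst).min?,
   (match ((q3Cand minL ign cs).map Prod.fst).min? with
    | none => 0
    | some m => ((((q3Cand minL ign cs).filter (fun p => decide (p.1 = m))).map Prod.snd).max?).getD 0),
   (cs.countP (fun c => decide ([c] = spec)) : Int))

theorem enumerate_append_singleton {α : Type} (xs : List α) (x : α) (s : Int) :
    PySem.List.enumerate (xs ++ [x]) s = PySem.List.enumerate xs s ++ [(s + xs.length, x)] := by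
  induction xs generalizing s with
  | nil => simp [PySem.List.enumerate_cons, PySem.List.enumerate_nil]
  | cons c t ih =>
    simp only [List.cons_append, PySem.List.enumerate_cons, ih, List.length_cons]
    push_cast
    ring_nf

theorem q3Go_append (minL ign spec : List Char) (xs : List Char) (c : Char) (i : Int)
    (st : Option Char × Int × Int) :
    q3Go minL ign spec (xs ++ [c]) i st =
      q3Step minL ign spec (i + xs.length) c (q3Go minL ign spec xs i st) := by
  induction xs generalizing i st with
  | nil => simp [q3Go]
  | cons d t ih =>
    simp only [List.cons_append, q3Go, ih, List.length_cons]
    congr 1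
    push_cast; ring

theorem q3Cand_append (minL ign : List Char) (xs : List Char) (x : Char) :
    q3Cand minL ign (xs ++ [x]) =
      q3Cand minL ign xs ++
        (if q3QualB minL ign x then [(x, (xs.length : Int))] else []) := by
  unfold q3Cand
  rw [enumerate_append_singleton]
  rw [List.filter_append, List.map_append]
  congr 1
  by_cases h : q3QualB minL ign x = true
  · simp [List.filter, h]
  · simp [List.filter, h]

theorem q3Cand_snd_lt (minL ign : List Char) (cs : List Char) :
    ∀ p ∈ q3Cand minL ign cs, p.2 < (cs.length : Int) := by
  intro p hp
  unfold q3Cand at hp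
  simp only [List.mem_map, List.mem_filter] at hp
  obtain ⟨q, ⟨hq, -⟩, rfl⟩ := hp
  have h1 : q.1 ∈ (PySem.List.enumerate cs 0).map Prod.fst := List.mem_map_of_mem hq
  rw [PySem.List.map_fst_enumerate] at h1
  have := (PySem.List.mem_pyRange_one.mp (by simpa using h1)).2
  simpa using this

theorem min?_concat_char (l : List Char) (x : Char) :
    (l ++ [x]).min? = some (l.min?.elim x (fun m => min m x)) := by
  induction l with
  | nil => simp
  | cons h t ih => cases ht : t.min? <;> simp_all [List.min?_cons, min_assoc]

theorem max?_concat_of_le (il : List Int) (x : Int) (h : ∀ j ∈ il, j ≤ x) :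
    (il ++ [x]).max? = some x := by
  induction il with
  | nil => simp
  | cons j t ih =>
    have hj : j ≤ x := h j (by simp)
    have := ih (fun k hk => h k (by simp [hk]))
    cases ht : (t ++ [x]).max? with
    | none => simp [ht] at this
    | some v =>
      rw [ht] at this
      simp only [List.cons_append, List.max?_cons, ht]
      simp_all

theorem parity_eq (n : Nat) : decide (2 ∣ (n : Int)) = !decide (n % 2 = 1) := by
  have h2 : ((2 : Int) ∣ (n : Int)) ↔ 2 ∣ n := by exact_mod_cast Int.natCast_dvd_natCast
  have h3 : (2 ∣ n) ↔ ¬ (n % 2 = 1) := by omega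
  simp only [h2, h3]
  rcases Nat.mod_two_eq_zero_or_one n with h | h <;> simp [h]

theorem count_step (spec : List Char) (xs : List Char) (x : Char) :
    (if [x] = spec then ((xs.countP (fun c => decide ([c] = spec)) : Nat) : Int) + 1
     else ((xs.countP (fun c => decide ([c] = spec)) : Nat) : Int))
      = (((xs ++ [x]).countP (fun c => decide ([c] = spec)) : Nat) : Int) := by
  rw [List.countP_append]
  by_cases h : [x] = spec
  · subst h; push_cast; simp
  · simp [h]

theorem q3Go_eq_bState (minL ign spec : List Char) (cs : List Char) :
    q3Go minL ign spec cs 0 (none, 0, 0) = bState minL ign spec cs := by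
  induction cs using List.reverseRecOn with
  | nil => simp [q3Go, bState, q3Cand, PySem.List.enumerate_nil]
  | append_singleton xs x ih =>
    rw [q3Go_append, ih]
    simp only [zero_add]
    by_cases hq : q3QualB minL ign x = true
    · -- x qualifies: the candidate list grows by (x, |xs|)
      obtain ⟨hlt', hig'⟩ := Bool.and_eq_true_iff.mp hq
      have hlt : minL < [x] := of_decide_eq_true hlt'
      have hig : PySem.Chars.isIn [x] ign = false := by simpa using hig'
      cases hmin : ((q3Cand minL ign xs).map Prod.fst).min? with
      | none =>
        have hcand : q3Cand minL ign xs = [] := by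
          simpa using List.min?_eq_none_iff.mp hmin
        simp [bState, q3Step, hcand, q3Cand_append, hq, hlt, hig, count_step]
      | some m =>
        by_cases hxm : x ≤ m
        · -- new char is weakly smallest: state becomes (some x, |xs|)
          have hminc : (List.map Prod.fst (q3Cand minL ign xs) ++ [x]).min? = some x := by
            rw [min?_concat_char, hmin]
            simp [min_eq_right hxm]
          have hbound : ∀ j ∈ (List.map Prod.snd
              (List.filter (fun p => decide (p.1 = x)) (q3Cand minL ign xs))),
              j ≤ (xs.length : Int) := by
            intro j hj
            simp only [List.mem_map, List.mem_filter] at hj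
            obtain ⟨p, ⟨hp, -⟩, rfl⟩ := hj
            exact le_of_lt (q3Cand_snd_lt minL ign xs p hp)
          simp only [bState, q3Step, hmin, q3Cand_append, if_pos hq, List.map_append,
                     List.map_cons, List.map_nil, List.filter_append, List.countP_append,
                     hminc, Prod.mk.injEq]
          rw [if_pos hlt, if_pos (show decide ([x] ≤ [m]) = true by
                simp [singleton_le_iff, hxm]), if_pos hig]
          refine ⟨rfl, ?_, ?_⟩
          · rw [show (List.filter (fun p => decide (p.1 = x)) [(x, (xs.length : Int))])
                  = [(x, (xs.length : Int))] by simp]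
            simp only [List.map_cons, List.map_nil]
            rw [max?_concat_of_le _ _ hbound]
            simp
          · have := count_step spec xs x
            rw [List.countP_append] at this
            simpa using this
        · -- current minimum stays: new char is strictly larger
          have hmx : m < x := not_le.mp hxm
          have hminc : (List.map Prod.fst (q3Cand minL ign xs) ++ [x]).min? = some m := by
            rw [min?_concat_char, hmin]
            simp [min_eq_left (le_of_lt hmx)]
          simp only [bState, q3Step, hmin, q3Cand_append, if_pos hq, List.map_append,
                     List.map_cons, List.map_nil, List.filter_append, List.countP_append,
                     hminc, Prod.mk.injEq]
          rw [if_pos hlt, if_neg (show ¬ decide ([x] ≤ [m]) = true by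
                simp [singleton_le_iff, hxm])]
          refine ⟨rfl, ?_, ?_⟩
          · rw [show (List.filter (fun p => decide (p.1 = m)) [(x, (xs.length : Int))])
                  = ([] : List (Char × Int)) by simp [ne_of_gt hmx]]
            simp
          · have := count_step spec xs x
            rw [List.countP_append] at this
            simpa using this
    · -- x does not qualify: candidates unchanged, only the counter may move
      have hq' : q3QualB minL ign x = false := by simpa using hq
      by_cases hlt : minL < [x]
      · have hig : PySem.Chars.isIn [x] ign = true := by
          cases hb : PySem.Chars.isIn [x] ign
          · exact absurd (by simp [q3QualB, hlt, hb]) hq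
          · rfl
        simp [bState, q3Step, q3Cand_append, count_step, hq', hlt, hig]
      · simp [bState, q3Step, q3Cand_append, count_step, hq', hlt]

-- D_q3 spelt with B's qualification helper (definitionally equal)
theorem D_q3_eq (i m g s : String) :
    D_q3 i m g s =
      ((match i.toList with
        | [] => false
        | c :: rest =>
            q3QualB m.toList g.toList c &&
              rest.all (fun d => !q3QualB m.toList g.toList d || decide (c < d))) = true) := rfl

-- membership in the candidate list, in terms of positions of the input
theorem mem_q3Cand (minL ign : List Char) (cs : List Char) (p : Char × Int) :
    p ∈ q3Cand minL ign cs ↔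
      ∃ (k : Nat) (h : k < cs.length), p = (cs[k], (k : Int)) ∧ q3QualB minL ign cs[k] = true := by
  unfold q3Cand
  simp only [List.mem_map, List.mem_filter, PySem.List.mem_enumerate_iff]
  constructor
  · rintro ⟨q, ⟨⟨k, hk, rfl⟩, hqual⟩, rfl⟩
    exact ⟨k, hk, by simp, by simpa using hqual⟩
  · rintro ⟨k, hk, rfl, hqual⟩
    exact ⟨((k : Int), cs[k]), ⟨⟨k, hk, by simp⟩, hqual⟩, rfl⟩

-- under D_, B's minimum is the head character
theorem min_of_D (minL ign : List Char) (c : Char) (rest : List Char)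
    (hqc : q3QualB minL ign c = true)
    (hrest : ∀ d ∈ rest, q3QualB minL ign d = true → c < d) :
    ((q3Cand minL ign (c :: rest)).map Prod.fst).min? = some c := by
  rw [List.min?_eq_some_iff]
  constructor
  · refine List.mem_map.mpr ⟨(c, 0), ?_, rfl⟩
    exact (mem_q3Cand minL ign (c :: rest) (c, 0)).mpr ⟨0, by simp, by simp, by simpa using hqc⟩
  · intro b hb
    obtain ⟨p, hp, rfl⟩ := List.mem_map.mp hb
    obtain ⟨k, hk, rfl, hq⟩ := (mem_q3Cand _ _ _ _).mp hp
    cases k with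
    | zero => simp
    | succ j =>
      have hj : j < rest.length := by simpa using hk
      have hmem : rest[j]'hj ∈ rest := List.getElem_mem hj
      simpa using le_of_lt (hrest _ hmem (by simpa using hq))

-- under D_, the max index of the minimal char is 0
theorem max_of_D (minL ign : List Char) (c : Char) (rest : List Char)
    (hqc : q3QualB minL ign c = true)
    (hrest : ∀ d ∈ rest, q3QualB minL ign d = true → c < d) :
    (((q3Cand minL ign (c :: rest)).filter (fun p => decide (p.1 = c))).map Prod.snd).max?
      = some 0 := by
  rw [List.max?_eq_some_iff]
  constructor
  · refine List.mem_map.mpr ⟨(c, 0), List.mem_filter.mpr ⟨?_, by simp⟩, rfl⟩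
    exact (mem_q3Cand minL ign (c :: rest) (c, 0)).mpr ⟨0, by simp, by simp, by simpa using hqc⟩
  · intro j hj
    obtain ⟨p, hp, rfl⟩ := List.mem_map.mp hj
    obtain ⟨hpc, hpe⟩ := List.mem_filter.mp hp
    obtain ⟨k, hk, rfl, hq⟩ := (mem_q3Cand _ _ _ _).mp hpc
    cases k with
    | zero => simp
    | succ j =>
      have hj' : j < rest.length := by simpa using hk
      have hmem : rest[j]'hj' ∈ rest := List.getElem_mem hj'
      have hlt := hrest _ hmem (by simpa using hq)
      have hceq : rest[j]'hj' = c := by simpa using of_decide_eq_true hpe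
      exact absurd hceq (ne_of_gt hlt)

-- outside D_, if a minimum exists, its winning (max) index is nonzero
theorem hi_ne_zero (i m g s : String) (mc : Char)
    (hnd : ¬ D_q3 i m g s)
    (hmin : ((q3Cand m.toList g.toList i.toList).map Prod.fst).min? = some mc) :
    ((((q3Cand m.toList g.toList i.toList).filter (fun p => decide (p.1 = mc))).map
        Prod.snd).max?).getD 0 ≠ 0 := by
  obtain ⟨hmem, hle⟩ := List.min?_eq_some_iff.mp hmin
  obtain ⟨p₀, hp₀, hp₀c⟩ := List.mem_map.mp hmem
  have hfmem : p₀.2 ∈ ((q3Cand m.toList g.toList i.toList).filter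
      (fun p => decide (p.1 = mc))).map Prod.snd :=
    List.mem_map_of_mem (List.mem_filter.mpr ⟨hp₀, by simp [hp₀c]⟩)
  cases hmax : (((q3Cand m.toList g.toList i.toList).filter
      (fun p => decide (p.1 = mc))).map Prod.snd).max? with
  | none =>
    rw [List.max?_eq_none_iff.mp hmax] at hfmem
    exact absurd hfmem (List.not_mem_nil)
  | some v =>
    obtain ⟨hvmem, hvle⟩ := List.max?_eq_some_iff.mp hmax
    simp only [Option.getD_some]
    intro hv0
    subst hv0
    -- the winning index is 0: the head matches and reconstructs D_q3, contradiction
    apply hnd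
    rw [D_q3_eq]
    obtain ⟨p, hp, hpsnd⟩ := List.mem_map.mp hvmem
    obtain ⟨hpc, hpe⟩ := List.mem_filter.mp hp
    obtain ⟨k, hk, rfl, hq⟩ := (mem_q3Cand _ _ _ _).mp hpc
    have hk0 : k = 0 := by
      have : ((k : Nat) : Int) = 0 := hpsnd
      omega
    subst hk0
    cases hcs : i.toList with
    | nil => rw [hcs] at hk; simp at hk
    | cons c rest =>
      have hc0 : i.toList[0]'hk = c := by simp only [hcs]; rfl
      have hcmc : c = mc := by rw [← hc0]; simpa using of_decide_eq_true hpe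
      simp only [Bool.and_eq_true, List.all_eq_true]
      refine ⟨by rw [← hc0]; exact hq, ?_⟩
      intro d hd
      by_cases hqd : q3QualB m.toList g.toList d = true
      · obtain ⟨j, hj, rfl⟩ := List.mem_iff_getElem.mp hd
        have hjmem : (i.toList[j + 1]'(by rw [hcs]; simpa using hj), ((j + 1 : Nat) : Int))
            ∈ q3Cand m.toList g.toList i.toList := by
          refine (mem_q3Cand _ _ _ _).mpr ⟨j + 1, by rw [hcs]; simpa using hj, rfl, ?_⟩
          have : i.toList[j + 1]'(by rw [hcs]; simpa using hj) = rest[j] := by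
            simp [hcs]
          rw [this]; exact hqd
        have hge : mc ≤ rest[j] := by
          have := hle _ (List.mem_map_of_mem hjmem)
          simpa [hcs] using this
        rcases lt_or_eq_of_le hge with hlt | heq
        · rw [← hcmc] at hlt
          simp [hlt]
        · -- rest[j] = mc: its index j+1 would exceed the max index 0
          exfalso
          have hfil : (i.toList[j + 1]'(by rw [hcs]; simpa using hj), ((j + 1 : Nat) : Int))
              ∈ (q3Cand m.toList g.toList i.toList).filter (fun p => decide (p.1 = mc)) := by
            refine List.mem_filter.mpr ⟨hjmem, ?_⟩
            simp [hcs, ← heq]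
          have := hvle _ (List.mem_map_of_mem hfil)
          simp at this
          omega
      · simp [hqd]

-- A = B outside D_
theorem q3_eq_of_not_D (i m g s : String) (hnd : ¬ D_q3 i m g s) :
    q3 i m g s = q3_alt i m g s := by
  unfold q3 q3_alt
  rw [q3Go_eq_bState]
  unfold bState
  cases hmin : ((q3Cand m.toList g.toList i.toList).map Prod.fst).min? with
  | none => simp [hmin, parity_eq]
  | some mc =>
    have hne := hi_ne_zero i m g s mc hnd hmin
    simp [hmin, parity_eq, hne]

-- A ≠ B everywhere inside D_
theorem q3_ne_of_D (i m g s : String) (hD : D_q3 i m g s) :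
    q3 i m g s ≠ q3_alt i m g s := by
  rw [D_q3_eq] at hD
  cases hcs : i.toList with
  | nil => rw [hcs] at hD; simp at hD
  | cons c rest =>
    rw [hcs] at hD
    simp only [Bool.and_eq_true, List.all_eq_true] at hD
    obtain ⟨hqc, hall⟩ := hD
    have hrest : ∀ d ∈ rest, q3QualB m.toList g.toList d = true → c < d := by
      intro d hd hq
      have := hall d hd
      simpa [hq] using this
    have hmin := min_of_D m.toList g.toList c rest hqc hrest
    have hmax := max_of_D m.toList g.toList c rest hqc hrest
    unfold q3 q3_alt
    rw [q3Go_eq_bState]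
    unfold bState
    rw [hcs]
    simp [hmin, hmax]

-- ===== VERDICT (by name: the statements are the Claim_ definitions above) =====
theorem q3_spec : Claim_unchanged_q3 := by
  intro i m g s _
  unfold Spec_q3
  intro hnd
  exact q3_eq_of_not_D i m g s hnd

theorem q3_changed : Claim_changed_q3 := by unfold Claim_changed_q3; decide

theorem q3_tight : Claim_exact_q3 := by
  intro i m g s _ hD
  exact q3_ne_of_D i m g s hD
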